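-- pv_equiv track=rewrite | github.com/monica-shi/karting | session/open_ai.py | __parse_result_message
-- ===== SOURCE A (Python) =====
-- def __parse_result_message(message):
--     result_dict = {}
--     section = None
--     lines = message.split("\n")
--     for line in lines:
--         if not line:
--             continue
--
--         if line[-1] == ':':
--             section = line[:-1].upper()
--             result_dict[section] = []
--             continue
--
--         if section is None:
--             continue
--
--         result_dict[section].append(line)
--
--     return result_dict
-- ===== SOURCE B (Python) =====
-- def __parse_result_message(message):
--     lines = message.split("\n")
--
--     def is_header(ln):
--         return bool(ln) and ln[-1] == ':'
--
--     n = len(lines)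
--     i = 0
--     # skip everything before the first header
--     while i < n and not is_header(lines[i]):
--         i += 1
--     result = {}
--     while i < n:
--         j = i + 1
--         while j < n and not is_header(lines[j]):
--             j += 1
--         result[lines[i][:-1].upper()] = [ln for ln in lines[i + 1:j] if ln]
--         i = j
--     return result
-- ===== Notes on version B (the rewrite author's own statement) =====
-- stated objective: alternative
-- what changed: Replaced A's single interleaved state-machine loop (carrying a current-section variable and appending line by line) with a two-phase block decomposition: skip lines before the first header, then for each header slice out its whole block up to the next header and assign its nonempty lines at once.
import Mathlib
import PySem

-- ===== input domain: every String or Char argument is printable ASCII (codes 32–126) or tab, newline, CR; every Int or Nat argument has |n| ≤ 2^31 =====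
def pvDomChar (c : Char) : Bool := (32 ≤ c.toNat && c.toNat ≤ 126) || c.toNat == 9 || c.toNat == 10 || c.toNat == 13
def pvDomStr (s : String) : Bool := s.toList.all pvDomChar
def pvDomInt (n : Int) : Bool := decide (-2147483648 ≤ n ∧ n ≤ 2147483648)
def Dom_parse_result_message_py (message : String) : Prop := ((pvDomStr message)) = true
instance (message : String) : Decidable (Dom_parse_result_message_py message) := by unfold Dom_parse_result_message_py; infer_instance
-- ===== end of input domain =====

-- B replaces A's interleaved state-machine loop by a two-phase block decomposition
-- (skip pre-header lines, then for each header slice out its block); objective: alternative.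


-- ===== PORT A =====
-- A's for-loop over the split lines, carried state = (result_dict, section).
-- result_dict[section].append(line) is Dict.modify; the key is always present
-- there (section was just inserted), so the [] default is never used.
def pvLoopA : List String → PySem.Dict String (List String) → Option String →
    PySem.Dict String (List String)
  | [], d, _ => d
  | line :: ls, d, sec =>
    if line = "" then pvLoopA ls d sec
    else if PySem.Str.pyGet? line (-1) == some ':' then
      let s := PySem.Str.upper (PySem.Str.slice line none (some (-1)))
      pvLoopA ls (d.insert s []) (some s)
    else
      match sec with
      | none => pvLoopA ls d sec
      | some s => pvLoopA ls (d.modify s [] (· ++ [line])) sec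

def parse_result_message_py (message : String) : List (String × List String) :=
  (pvLoopA ((PySem.Str.split? message "\n").getD []) PySem.Dict.empty none).items

-- ===== PORT B =====
def pvIsHeader (ln : String) : Bool := !(ln == "") && (PySem.Str.pyGet? ln (-1) == some ':')

-- outer while-loop of Source B: the list argument starts at header position i;
-- the inner j-scan up to the next header is the takeWhile/dropWhile split.
def pvBlocks : List String → PySem.Dict String (List String) → PySem.Dict String (List String)
  | [], result => result
  | h :: rest, result =>
    pvBlocks (rest.dropWhile (fun l => !pvIsHeader l))
      (result.insert (PySem.Str.upper (PySem.Str.slice h none (some (-1))))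
        ((rest.takeWhile (fun l => !pvIsHeader l)).filter (fun l => !(l == ""))))
  termination_by ls _ => ls.length
  decreasing_by
    exact Nat.lt_succ_of_le (List.length_dropWhile_le _ _)

def parse_result_message_py_alt (message : String) : List (String × List String) :=
  let lines := (PySem.Str.split? message "\n").getD []
  (pvBlocks (lines.dropWhile (fun l => !pvIsHeader l)) PySem.Dict.empty).items

-- ===== PRECONDITION & SPEC =====
def Spec_parse_result_message_py (message : String) (out : List (String × List String)) : Prop := out = parse_result_message_py_alt message
instance (message : String) (out : List (String × List String)) : Decidable (Spec_parse_result_message_py message out) := by unfold Spec_parse_result_message_py; infer_instance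

-- ===== CLAIM (what is proved, stated in full; the proofs are below) =====
def Claim_equal_parse_result_message_py : Prop := ∀ (message : String), Dom_parse_result_message_py message → Spec_parse_result_message_py message (parse_result_message_py message)

-- ===== LEMMAS AND PROOFS =====

-- updating the freshly (re)written key s collapses modify into one insert
lemma pv_modify_insert (d : PySem.Dict String (List String)) (s : String)
    (acc : List String) (l : String) :
    (d.insert s acc).modify s [] (· ++ [l]) = d.insert s (acc ++ [l]) := by
  simp [PySem.Dict.modify, PySem.Dict.getD_insert_self, PySem.Dict.insert_insert_self]

-- block invariant: inside section s with accumulated lines acc, A's loop first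
-- consumes the non-header lines (appending the nonempty ones) and then proceeds
-- exactly like pvBlocks from the next header on
lemma pv_loopA_some (ls : List String) :
    ∀ (d : PySem.Dict String (List String)) (s : String) (acc : List String),
    pvLoopA ls (d.insert s acc) (some s) =
      pvBlocks (ls.dropWhile (fun l => !pvIsHeader l))
        (d.insert s (acc ++ (ls.takeWhile (fun l => !pvIsHeader l)).filter (fun l => !(l == "")))) := by
  induction ls with
  | nil => intro d s acc; simp [pvLoopA, pvBlocks]
  | cons l ls ih =>
    intro d s acc
    by_cases he : l = ""
    · subst he
      simp [pvLoopA, pvIsHeader, List.dropWhile, List.takeWhile, ih]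
    · by_cases hc : PySem.Str.pyGet? l (-1) == some ':'
      · have hh : pvIsHeader l = true := by
          simp only [pvIsHeader]; rw [hc]; simp [he]
        simp only [pvLoopA, if_neg he, if_pos hc]
        rw [ih ((d.insert s acc)) _ []]
        simp [List.dropWhile, List.takeWhile, hh, pvBlocks]
      · have hh : pvIsHeader l = false := by
          simp only [pvIsHeader]; rw [Bool.eq_false_iff.mpr hc]; simp
        simp only [pvLoopA, if_neg he, if_neg hc]
        rw [pv_modify_insert, ih]
        simp [List.dropWhile, List.takeWhile, hh, he]
  -- (nonempty non-header line l: both sides append l to section s)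

-- before the first header both programs ignore every line
lemma pv_loopA_none (ls : List String) :
    ∀ (d : PySem.Dict String (List String)),
    pvLoopA ls d none = pvBlocks (ls.dropWhile (fun l => !pvIsHeader l)) d := by
  induction ls with
  | nil => intro d; simp [pvLoopA, pvBlocks]
  | cons l ls ih =>
    intro d
    by_cases he : l = ""
    · subst he; simp [pvLoopA, pvIsHeader, List.dropWhile, ih]
    · by_cases hc : PySem.Str.pyGet? l (-1) == some ':'
      · have hh : pvIsHeader l = true := by
          simp only [pvIsHeader]; rw [hc]; simp [he]
        simp only [pvLoopA, if_neg he, if_pos hc]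
        have := pv_loopA_some ls d (PySem.Str.upper (PySem.Str.slice l none (some (-1)))) []
        simp only [List.nil_append] at this
        rw [this]
        simp [List.dropWhile, hh, pvBlocks]
      · have hh : pvIsHeader l = false := by
          simp only [pvIsHeader]; rw [Bool.eq_false_iff.mpr hc]; simp
        simp only [pvLoopA, if_neg he, if_neg hc]
        rw [ih]
        simp [List.dropWhile, hh]

-- ===== VERDICT (by name: the statement is the Claim_ definition above) =====
theorem parse_result_message_py_spec : Claim_equal_parse_result_message_py := by
  intro message _
  unfold Spec_parse_result_message_py parse_result_message_py parse_result_message_py_alt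
  rw [pv_loopA_none]
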